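-- pv_equiv track=rewrite | github.com/jlcarr/problem_generator | src/long_addition.py | gen_long_additon
-- ===== SOURCE A (Python) =====
-- def gen_long_additon(input1, input2):
-- 	"""
-- 	Given two integers this function will return the LaTex code as a string describing their additon
-- 	"""
-- 	output = input1 + input2
--
-- 	# ensure correct orientation
-- 	if input2>input1:
-- 		temp = input1
-- 		input1 = input2
-- 		input2 = temp
--
-- 	input1 = list(str(input1))
-- 	input2 = list(str(input2))
-- 	output = list(str(output))
--
-- 	max_len = max(len(input1), len(input2), len(output))
--
-- 	doc = ""
-- 	doc += "\\documentclass{article}\n"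
-- 	doc += "\\usepackage{array,mathtools}\n"
--
-- 	doc += "\\begin{document}\n"
-- 	doc += "\\begin{equation*}\n"
--
-- 	doc += "\\setlength\\arraycolsep{1pt}\n"
-- 	doc += "\\begin{array}{*{"+str(max_len)+"}{c}}\n"
--
--
-- 	input1_latex = " \\\\\n"
-- 	input2_latex = " \\\\\n"
-- 	output_latex = " \\\\\n"
--
-- 	carry = 0
-- 	while input1 and input2 and output:
-- 		digit1 = input1.pop()
-- 		digit2 = input2.pop()
-- 		digit3 = output.pop()
--
-- 		if carry:
-- 			input1_latex = " & \overset{" + str(carry) + "}{" + digit1 + "}" + input1_latex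
-- 		else:
-- 			input1_latex = " & " + digit1 + input1_latex
--
-- 		input2_latex = " & " + digit2 + input2_latex
-- 		output_latex = " & " + digit3 + output_latex
--
-- 		carry = (int(digit1)+int(digit2)+carry)//10
--
-- 	while input1 and output:
-- 		digit1 = input1.pop()
-- 		digit3 = output.pop()
--
-- 		if carry:
-- 			input1_latex = " & \overset{" + str(carry) + "}{" + digit1 + "}" + input1_latex
-- 		else:
-- 			input1_latex = " & " + digit1 + input1_latex
--
-- 		input2_latex = " & " + input2_latex
-- 		output_latex = " & " + digit3 + output_latex
--
-- 		carry = (int(digit1)+carry)//10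
--
-- 	while output:
-- 		digit3 = output.pop()
--
-- 		if carry:
-- 			input1_latex = " & \overset{" + str(carry) + "}{\phantom{0}}" + input1_latex
-- 		else:
-- 			input1_latex = " & " + input1_latex
--
-- 		input2_latex = " & " + input2_latex
-- 		output_latex = " & " + digit3 + output_latex
--
-- 	input1_latex = input1_latex[3:]
-- 	input2_latex = input2_latex[3:]
-- 	output_latex = output_latex[3:]
--
--
-- 	doc += input1_latex
-- 	doc += input2_latex
-- 	doc += "\\hline\n"
-- 	doc += output_latex
--
-- 	doc += "\\end{array}\n"
--
-- 	doc += "\\end{equation*}\n"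
-- 	doc += "\\end{document}"
--
-- 	return doc
-- ===== SOURCE B (Python) =====
-- def _pad(t, n):
--     """Digits of t left-padded with None placeholders to n columns, aligned at the units digit."""
--     return [None] * (n - len(t)) + list(t)
--
--
-- def _cells(rcols, carry):
--     """rcols: (digit1, digit2, sum-digit) columns listed right-to-left (units first), with
--     None placeholders; carry = incoming carry of the first column.  Returns the three rows
--     as cell lists in left-to-right order."""
--     if not rcols:
--         return [], [], []
--     da, db, ds = rcols[0]
--     if carry:
--         cell1 = "\\overset{%d}{%s}" % (carry, da if da is not None else "\\phantom{0}")
--     else: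
--         cell1 = da if da is not None else ""
--     cell2 = db if db is not None else ""
--     cell3 = ds if ds is not None else ""
--     if da is not None:
--         out = (int(da) + (int(db) if db is not None else 0) + carry) // 10
--     else:
--         out = carry
--     r1, r2, r3 = _cells(rcols[1:], out)
--     return r1 + [cell1], r2 + [cell2], r3 + [cell3]
--
--
-- def gen_long_additon(input1, input2):
--     """
--     Given two integers this function will return the LaTex code as a string describing their additon
--     """
--     total = input1 + input2
--     if input2 > input1:
--         input1, input2 = input2, input1
--     a, b, s = str(input1), str(input2), str(total)
--     n = max(len(a), len(b), len(s))
--     cols = list(zip(_pad(a, n), _pad(b, n), _pad(s, n)))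
--     row1, row2, row3 = _cells(list(reversed(cols)), 0)
--     return (
--         "\\documentclass{article}\n"
--         "\\usepackage{array,mathtools}\n"
--         "\\begin{document}\n"
--         "\\begin{equation*}\n"
--         "\\setlength\\arraycolsep{1pt}\n"
--         "\\begin{array}{*{" + str(n) + "}{c}}\n"
--         + " & ".join(row1) + " \\\\\n"
--         + " & ".join(row2) + " \\\\\n"
--         + "\\hline\n"
--         + " & ".join(row3) + " \\\\\n"
--         + "\\end{array}\n"
--         "\\end{equation*}\n"
--         "\\end{document}"
--     )
-- ===== Notes on version B (the rewrite author's own statement) =====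
-- stated objective: simpler
-- what changed: A's three sequential pop-and-prepend while-loops with string surgery (leading-' & ' trim via [3:]) are replaced by padding the three digit strings to a common width and one recursive right-to-left pass over the zipped columns that threads the carry and yields the three rows as cell lists, joined with ' & '.
import Mathlib
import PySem

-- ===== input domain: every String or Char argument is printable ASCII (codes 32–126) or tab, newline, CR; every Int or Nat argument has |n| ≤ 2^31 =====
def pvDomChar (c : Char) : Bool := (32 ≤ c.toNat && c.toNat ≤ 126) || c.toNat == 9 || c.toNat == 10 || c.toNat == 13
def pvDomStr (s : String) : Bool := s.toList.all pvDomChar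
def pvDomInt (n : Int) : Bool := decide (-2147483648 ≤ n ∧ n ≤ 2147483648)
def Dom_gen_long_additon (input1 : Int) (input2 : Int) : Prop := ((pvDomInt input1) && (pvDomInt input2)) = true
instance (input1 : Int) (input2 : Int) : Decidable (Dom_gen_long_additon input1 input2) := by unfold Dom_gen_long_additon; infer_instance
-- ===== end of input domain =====

-- B replaces A's three pop-and-prepend while-loops (plus the leading-" & " trim) by one
-- recursive right-to-left pass over the None-padded, zipped digit columns that threads the
-- carry and emits the three rows as cell lists joined with " & " — same output, simpler shape.


-- ===== PORT A =====
-- int(d) for a one-character string d (both Pythons call it on digit characters only inside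
-- Pre_, where ofChars? is always `some`; the getD default is never reached there)
def pvIntDigit (c : Char) : Int := (PySem.Int.ofChars? [c]).getD 0

-- first while loop: all three digit lists nonempty; Python's pop() from the right is encoded
-- as head recursion on the REVERSED lists
def pvLoop1 : List Char → List Char → List Char → Int → List Char → List Char → List Char →
    List Char × List Char × List Char × Int × List Char × List Char × List Char
  | d1 :: r1, d2 :: r2, d3 :: r3, carry, l1, l2, l3 =>
      let l1 := if carry ≠ 0 then
          " & \\overset{".toList ++ PySem.Int.toChars carry ++ "}{".toList ++ [d1] ++ "}".toList ++ l1
        else " & ".toList ++ [d1] ++ l1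
      let l2 := " & ".toList ++ [d2] ++ l2
      let l3 := " & ".toList ++ [d3] ++ l3
      pvLoop1 r1 r2 r3 (PySem.Int.floordiv (pvIntDigit d1 + pvIntDigit d2 + carry) 10) l1 l2 l3
  | r1, r2, r3, carry, l1, l2, l3 => (r1, r2, r3, carry, l1, l2, l3)

-- second while loop: input1 and output nonempty
def pvLoop2 : List Char → List Char → Int → List Char → List Char → List Char →
    List Char × List Char × Int × List Char × List Char × List Char
  | d1 :: r1, d3 :: r3, carry, l1, l2, l3 =>
      let l1 := if carry ≠ 0 then
          " & \\overset{".toList ++ PySem.Int.toChars carry ++ "}{".toList ++ [d1] ++ "}".toList ++ l1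
        else " & ".toList ++ [d1] ++ l1
      let l2 := " & ".toList ++ l2
      let l3 := " & ".toList ++ [d3] ++ l3
      pvLoop2 r1 r3 (PySem.Int.floordiv (pvIntDigit d1 + carry) 10) l1 l2 l3
  | r1, r3, carry, l1, l2, l3 => (r1, r3, carry, l1, l2, l3)

-- third while loop: output only; carry is never reassigned in this loop
def pvLoop3 : List Char → Int → List Char → List Char → List Char →
    List Char × List Char × List Char
  | d3 :: r3, carry, l1, l2, l3 =>
      let l1 := if carry ≠ 0 then
          " & \\overset{".toList ++ PySem.Int.toChars carry ++ "}{\\phantom{0}}".toList ++ l1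
        else " & ".toList ++ l1
      let l2 := " & ".toList ++ l2
      let l3 := " & ".toList ++ [d3] ++ l3
      pvLoop3 r3 carry l1 l2 l3
  | [], _, l1, l2, l3 => (l1, l2, l3)

-- compositions of A's loops (proof-side names for pvBodyA's let-chain)
def pvLoops23 (ra rs : List Char) (c : Int) (l1 l2 l3 : List Char) :
    List Char × List Char × List Char :=
  match pvLoop2 ra rs c l1 l2 l3 with
  | (_, r3, c2, m1, m2, m3) => pvLoop3 r3 c2 m1 m2 m3

def pvLoops123 (ra rb rs : List Char) (c : Int) (l1 l2 l3 : List Char) :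
    List Char × List Char × List Char :=
  match pvLoop1 ra rb rs c l1 l2 l3 with
  | (r1, _, r3, c1, m1, m2, m3) => pvLoops23 r1 r3 c1 m1 m2 m3

-- everything after the orientation swap (input1 ≥ input2 here)
def pvBodyA (input1 input2 output : Int) : String :=
  let i1 := PySem.Int.toChars input1            -- list(str(input1))
  let i2 := PySem.Int.toChars input2
  let io := PySem.Int.toChars output
  let max_len : Int := max (max (PySem.List.len i1) (PySem.List.len i2)) (PySem.List.len io)
  let doc := "\\documentclass{article}\n".toList ++ "\\usepackage{array,mathtools}\n".toList
    ++ "\\begin{document}\n".toList ++ "\\begin{equation*}\n".toList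
    ++ "\\setlength\\arraycolsep{1pt}\n".toList
    ++ "\\begin{array}{*{".toList ++ PySem.Int.toChars max_len ++ "}{c}}\n".toList
  let tail := " \\\\\n".toList
  let (l1, l2, l3) := pvLoops123 i1.reverse i2.reverse io.reverse 0 tail tail tail
  let l1 := PySem.List.slice l1 (some 3) none   -- input1_latex[3:]
  let l2 := PySem.List.slice l2 (some 3) none
  let l3 := PySem.List.slice l3 (some 3) none
  String.ofList (doc ++ l1 ++ l2 ++ "\\hline\n".toList ++ l3
    ++ "\\end{array}\n".toList ++ "\\end{equation*}\n".toList ++ "\\end{document}".toList)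

def gen_long_additon (input1 : Int) (input2 : Int) : String :=
  let output := input1 + input2
  if input2 > input1 then pvBodyA input2 input1 output else pvBodyA input1 input2 output

-- ===== PORT B =====
-- _pad: digits left-padded with None placeholders to n columns
def pvPad (t : List Char) (n : Nat) : List (Option Char) :=
  List.replicate (n - t.length) none ++ t.map some

-- _cells: one pass over the columns listed right-to-left, threading the carry
def pvCellsB : List (Option Char × Option Char × Option Char) → Int →
    List (List Char) × List (List Char) × List (List Char)
  | [], _ => ([], [], [])
  | (da, db, ds) :: rest, carry =>
      let cell1 :=
        if carry ≠ 0 then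
          "\\overset{".toList ++ PySem.Int.toChars carry ++ "}{".toList ++
            (match da with | some d => [d] | none => "\\phantom{0}".toList) ++ "}".toList
        else match da with | some d => [d] | none => []
      let cell2 := match db with | some d => [d] | none => ([] : List Char)
      let cell3 := match ds with | some d => [d] | none => ([] : List Char)
      let out := match da with
        | some d => PySem.Int.floordiv
            (pvIntDigit d + (match db with | some e => pvIntDigit e | none => 0) + carry) 10
        | none => carry
      let (r1, r2, r3) := pvCellsB rest out
      (r1 ++ [cell1], r2 ++ [cell2], r3 ++ [cell3])

-- everything after the orientation swap (input1 ≥ input2 here)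
def pvBodyB (input1 input2 total : Int) : String :=
  let a := PySem.Int.toChars input1
  let b := PySem.Int.toChars input2
  let s := PySem.Int.toChars total
  let n := max (max a.length b.length) s.length
  let cols := List.zip (pvPad a n) (List.zip (pvPad b n) (pvPad s n))
  let (row1, row2, row3) := pvCellsB cols.reverse 0
  String.ofList (
    "\\documentclass{article}\n\\usepackage{array,mathtools}\n\\begin{document}\n\\begin{equation*}\n\\setlength\\arraycolsep{1pt}\n\\begin{array}{*{".toList
    ++ PySem.Int.toChars (n : Int) ++ "}{c}}\n".toList
    ++ PySem.Chars.join " & ".toList row1 ++ " \\\\\n".toList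
    ++ PySem.Chars.join " & ".toList row2 ++ " \\\\\n".toList
    ++ "\\hline\n".toList
    ++ PySem.Chars.join " & ".toList row3 ++ " \\\\\n".toList
    ++ "\\end{array}\n\\end{equation*}\n\\end{document}".toList)

def gen_long_additon_alt (input1 : Int) (input2 : Int) : String :=
  let total := input1 + input2
  if input2 > input1 then pvBodyB input2 input1 total else pvBodyB input1 input2 total

-- ===== PRECONDITION & SPEC =====
-- Pre_ restricts to the function's natural domain, nonnegative integers: with a negative
-- argument A usually raises ValueError (int('-')), and in the remaining corner cases its
-- loops silently drop the '-' column from the table — an accident B does not reproduce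
-- (B either raises ValueError or renders the '-' column, depending on the digit counts).
def Pre_gen_long_additon (input1 : Int) (input2 : Int) : Prop := 0 ≤ input1 ∧ 0 ≤ input2
instance (input1 : Int) (input2 : Int) : Decidable (Pre_gen_long_additon input1 input2) := by
  unfold Pre_gen_long_additon; infer_instance

def pvWitness_gen_long_additon : Int × Int := (12, 5)

def Spec_gen_long_additon (input1 : Int) (input2 : Int) (out : String) : Prop := out = gen_long_additon_alt input1 input2
instance (input1 : Int) (input2 : Int) (out : String) : Decidable (Spec_gen_long_additon input1 input2 out) := by unfold Spec_gen_long_additon; infer_instance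

-- ===== CLAIM (what is proved, stated in full; the proofs are below) =====
def Claim_equal_gen_long_additon : Prop := ∀ (input1 : Int) (input2 : Int), Dom_gen_long_additon input1 input2 → Pre_gen_long_additon input1 input2 → Spec_gen_long_additon input1 input2 (gen_long_additon input1 input2)

-- ===== LEMMAS AND PROOFS =====

-- length of Nat.toDigits is log₁₀ + 1
lemma pvToDigitsCore_len (f : Nat) : ∀ (n : Nat) (l : List Char), n < f →
    (Nat.toDigitsCore 10 f n l).length = Nat.log 10 n + 1 + l.length := by
  induction f with
  | zero => intro n l h; omega
  | succ f ih =>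
    intro n l h
    rw [Nat.toDigitsCore]
    by_cases h10 : n / 10 = 0
    · have hn : n < 10 := by
        rcases Nat.div_eq_zero_iff.mp h10 with h' | h'
        · omega
        · exact h'
      simp [h10, Nat.log_of_lt hn]; omega
    · have hn : 10 ≤ n := by
        by_contra hc
        exact h10 (Nat.div_eq_zero_iff.mpr (Or.inr (by omega)))
      simp only [h10, if_false]
      rw [ih (n / 10) _ (by
        have := Nat.div_lt_self (by omega : 0 < n) (by norm_num : 1 < 10)
        omega)]
      rw [Nat.log_of_one_lt_of_le (by norm_num) hn]
      simp
      omega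

lemma pvToChars_len (m : Int) (hm : 0 ≤ m) :
    (PySem.Int.toChars m).length = Nat.log 10 m.toNat + 1 := by
  unfold PySem.Int.toChars
  rw [if_neg (by omega)]
  rw [Nat.toDigits, pvToDigitsCore_len _ _ _ (Nat.lt_succ_self _)]
  simp

lemma pvToChars_ne_nil (m : Int) (hm : 0 ≤ m) : PySem.Int.toChars m ≠ [] := by
  have := pvToChars_len m hm
  intro h
  rw [h] at this
  simp at this

lemma pvToChars_len_mono {m n : Int} (hm : 0 ≤ m) (hmn : m ≤ n) :
    (PySem.Int.toChars m).length ≤ (PySem.Int.toChars n).length := by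
  rw [pvToChars_len m hm, pvToChars_len n (le_trans hm hmn)]
  have : m.toNat ≤ n.toNat := Int.toNat_le_toNat hmn
  exact Nat.add_le_add_right (Nat.log_mono_right this) 1

-- proof-side names for the cells and the carry update of pvCellsB
def pvCell1 (da : Option Char) (carry : Int) : List Char :=
  if carry ≠ 0 then
    "\\overset{".toList ++ PySem.Int.toChars carry ++ "}{".toList ++
      (match da with | some d => [d] | none => "\\phantom{0}".toList) ++ "}".toList
  else match da with | some d => [d] | none => []

def pvCellD (d : Option Char) : List Char := match d with | some d => [d] | none => []

def pvOut (col : Option Char × Option Char × Option Char) (carry : Int) : Int :=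
  match col.1 with
  | some d => PySem.Int.floordiv
      (pvIntDigit d + (match col.2.1 with | some e => pvIntDigit e | none => 0) + carry) 10
  | none => carry

lemma pvCellsB_cons (da db ds : Option Char)
    (rest : List (Option Char × Option Char × Option Char)) (carry : Int) :
    pvCellsB ((da, db, ds) :: rest) carry =
      ((pvCellsB rest (pvOut (da, db, ds) carry)).1 ++ [pvCell1 da carry],
       (pvCellsB rest (pvOut (da, db, ds) carry)).2.1 ++ [pvCellD db],
       (pvCellsB rest (pvOut (da, db, ds) carry)).2.2 ++ [pvCellD ds]) := by
  simp [pvCellsB, pvCell1, pvCellD, pvOut]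

-- the row strings A builds: each cell prefixed by " & ", prepended onto acc
def pvRowStr (cells : List (List Char)) (acc : List Char) : List Char :=
  cells.foldr (fun c r => " & ".toList ++ c ++ r) acc

lemma pvRowStr_eq_join (cells : List (List Char)) (h : cells ≠ []) (acc : List Char) :
    pvRowStr cells acc = " & ".toList ++ PySem.Chars.join " & ".toList cells ++ acc := by
  induction cells with
  | nil => exact absurd rfl h
  | cons c rest ih =>
    cases rest with
    | nil => simp [pvRowStr, PySem.Chars.join_singleton]
    | cons c' rest' =>
      rw [PySem.Chars.join_cons_cons]
      have := ih (by simp)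
      simp only [pvRowStr, List.foldr_cons] at this ⊢
      rw [this]
      simp [List.append_assoc]

-- literal decompositions used by the step lemmas
lemma pvLit_overset : " & \\overset{".toList = " & ".toList ++ "\\overset{".toList := rfl
lemma pvLit_phantom : "}{\\phantom{0}}".toList = "}{".toList ++ ("\\phantom{0}".toList ++ "}".toList) := rfl

lemma pvLoops23_nil1 (rs : List Char) (c : Int) (l1 l2 l3 : List Char) :
    pvLoops23 [] rs c l1 l2 l3 = pvLoop3 rs c l1 l2 l3 := by cases rs <;> rfl

lemma pvLoops23_cons (d1 d3 : Char) (ra rs : List Char) (c : Int) (l1 l2 l3 : List Char) :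
    pvLoops23 (d1 :: ra) (d3 :: rs) c l1 l2 l3 =
      pvLoops23 ra rs (PySem.Int.floordiv (pvIntDigit d1 + c) 10)
        (if c ≠ 0 then
            " & \\overset{".toList ++ PySem.Int.toChars c ++ "}{".toList ++ [d1] ++ "}".toList ++ l1
          else " & ".toList ++ [d1] ++ l1)
        (" & ".toList ++ l2) (" & ".toList ++ [d3] ++ l3) := rfl

lemma pvLoops123_nil2 (ra rs : List Char) (c : Int) (l1 l2 l3 : List Char) :
    pvLoops123 ra [] rs c l1 l2 l3 = pvLoops23 ra rs c l1 l2 l3 := by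
  cases ra <;> cases rs <;> rfl

lemma pvLoops123_cons (d1 d2 d3 : Char) (ra rb rs : List Char) (c : Int) (l1 l2 l3 : List Char) :
    pvLoops123 (d1 :: ra) (d2 :: rb) (d3 :: rs) c l1 l2 l3 =
      pvLoops123 ra rb rs (PySem.Int.floordiv (pvIntDigit d1 + pvIntDigit d2 + c) 10)
        (if c ≠ 0 then
            " & \\overset{".toList ++ PySem.Int.toChars c ++ "}{".toList ++ [d1] ++ "}".toList ++ l1
          else " & ".toList ++ [d1] ++ l1)
        (" & ".toList ++ [d2] ++ l2) (" & ".toList ++ [d3] ++ l3) := rfl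

-- phase 3: output digits only
lemma pvChain3 (rs : List Char) (c : Int) (l1 l2 l3 : List Char) :
    pvLoop3 rs c l1 l2 l3 =
      ((pvCellsB (rs.map fun d => (none, none, some d)) c).1.foldr (fun cl r => " & ".toList ++ cl ++ r) l1,
       (pvCellsB (rs.map fun d => (none, none, some d)) c).2.1.foldr (fun cl r => " & ".toList ++ cl ++ r) l2,
       (pvCellsB (rs.map fun d => (none, none, some d)) c).2.2.foldr (fun cl r => " & ".toList ++ cl ++ r) l3) := by
  induction rs generalizing l1 l2 l3 with
  | nil => simp [pvLoop3, pvCellsB]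
  | cons d rs ih =>
    rw [List.map_cons, pvCellsB_cons]
    have hout : pvOut (none, none, some d) c = c := rfl
    rw [hout]
    simp only [pvLoop3, List.foldr_append, List.foldr_cons, List.foldr_nil]
    rw [ih]
    by_cases hc : c = 0
    · simp [hc, pvCell1, pvCellD]
    · simp [hc, pvCell1, pvCellD, pvLit_overset, pvLit_phantom, List.append_assoc]

lemma pvZipRep (rs : List Char) :
    List.zip (List.replicate rs.length (none : Option Char))
      (List.zip (List.replicate rs.length (none : Option Char)) (rs.map some)) =
      rs.map fun d => ((none : Option Char), (none : Option Char), some d) := by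
  induction rs with
  | nil => rfl
  | cons d rs ih => simp [List.replicate_succ, ih]

-- phase 2 then 3
lemma pvChain2 (ra : List Char) : ∀ (rs : List Char) (c : Int) (l1 l2 l3 : List Char),
    ra.length ≤ rs.length →
    pvLoops23 ra rs c l1 l2 l3 =
      ((pvCellsB (List.zip (ra.map some ++ List.replicate (rs.length - ra.length) none)
          (List.zip (List.replicate rs.length (none : Option Char)) (rs.map some))) c).1.foldr (fun cl r => " & ".toList ++ cl ++ r) l1,
       (pvCellsB (List.zip (ra.map some ++ List.replicate (rs.length - ra.length) none)
          (List.zip (List.replicate rs.length (none : Option Char)) (rs.map some))) c).2.1.foldr (fun cl r => " & ".toList ++ cl ++ r) l2,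
       (pvCellsB (List.zip (ra.map some ++ List.replicate (rs.length - ra.length) none)
          (List.zip (List.replicate rs.length (none : Option Char)) (rs.map some))) c).2.2.foldr (fun cl r => " & ".toList ++ cl ++ r) l3) := by
  induction ra with
  | nil =>
    intro rs c l1 l2 l3 _
    simp only [List.map_nil, List.nil_append, List.length_nil, Nat.sub_zero, pvZipRep,
      pvLoops23_nil1]
    exact pvChain3 rs c l1 l2 l3
  | cons d1 ra ih =>
    intro rs c l1 l2 l3 hlen
    cases rs with
    | nil => simp at hlen
    | cons d3 rs =>
      simp only [List.length_cons, List.map_cons, List.replicate_succ,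
        Nat.succ_sub_succ]
      rw [List.cons_append, List.zip_cons_cons, List.zip_cons_cons, pvCellsB_cons]
      have hout : pvOut (some d1, none, some d3) c
          = PySem.Int.floordiv (pvIntDigit d1 + c) 10 := by
        simp [pvOut]
      rw [hout, pvLoops23_cons]
      rw [ih rs (PySem.Int.floordiv (pvIntDigit d1 + c) 10) _ _ _ (by simpa using hlen)]
      simp only [List.foldr_append, List.foldr_cons, List.foldr_nil]
      by_cases hc : c = 0
      · simp [hc, pvCell1, pvCellD]
      · simp [hc, pvCell1, pvCellD, pvLit_overset, List.append_assoc]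

-- all three phases
lemma pvChain1 (rb : List Char) : ∀ (ra rs : List Char) (c : Int) (l1 l2 l3 : List Char),
    rb.length ≤ ra.length → ra.length ≤ rs.length →
    pvLoops123 ra rb rs c l1 l2 l3 =
      ((pvCellsB (List.zip (ra.map some ++ List.replicate (rs.length - ra.length) none)
          (List.zip (rb.map some ++ List.replicate (rs.length - rb.length) none) (rs.map some))) c).1.foldr (fun cl r => " & ".toList ++ cl ++ r) l1,
       (pvCellsB (List.zip (ra.map some ++ List.replicate (rs.length - ra.length) none)
          (List.zip (rb.map some ++ List.replicate (rs.length - rb.length) none) (rs.map some))) c).2.1.foldr (fun cl r => " & ".toList ++ cl ++ r) l2,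
       (pvCellsB (List.zip (ra.map some ++ List.replicate (rs.length - ra.length) none)
          (List.zip (rb.map some ++ List.replicate (rs.length - rb.length) none) (rs.map some))) c).2.2.foldr (fun cl r => " & ".toList ++ cl ++ r) l3) := by
  induction rb with
  | nil =>
    intro ra rs c l1 l2 l3 _ hlen
    simp only [List.map_nil, List.nil_append, Nat.sub_zero, List.length_nil,
      pvLoops123_nil2]
    exact pvChain2 ra rs c l1 l2 l3 hlen
  | cons d2 rb ih =>
    intro ra rs c l1 l2 l3 hlen1 hlen2
    cases ra with
    | nil => simp at hlen1
    | cons d1 ra =>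
      cases rs with
      | nil => simp at hlen2
      | cons d3 rs =>
        simp only [List.length_cons, List.map_cons, Nat.succ_sub_succ]
        rw [List.cons_append, List.cons_append, List.zip_cons_cons, List.zip_cons_cons,
          pvCellsB_cons]
        have hout : pvOut (some d1, some d2, some d3) c
            = PySem.Int.floordiv (pvIntDigit d1 + pvIntDigit d2 + c) 10 := by
          simp [pvOut]
        rw [hout, pvLoops123_cons]
        rw [ih ra rs (PySem.Int.floordiv (pvIntDigit d1 + pvIntDigit d2 + c) 10) _ _ _
          (by simpa using hlen1) (by simpa using hlen2)]
        simp only [List.foldr_append, List.foldr_cons, List.foldr_nil]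
        by_cases hc : c = 0
        · simp [hc, pvCell1, pvCellD]
        · simp [hc, pvCell1, pvCellD, pvLit_overset, List.append_assoc]

lemma pvZip_reverse {α β : Type} (xs : List α) : ∀ (ys : List β), xs.length = ys.length →
    (xs.zip ys).reverse = xs.reverse.zip ys.reverse := by
  induction xs with
  | nil => intro ys h; cases ys <;> simp at h ⊢
  | cons x xs ih =>
    intro ys h
    cases ys with
    | nil => simp at h
    | cons y ys =>
      simp only [List.zip_cons_cons, List.reverse_cons]
      rw [ih ys (by simpa using h), List.zip_append (by simpa using h)]
      rfl

lemma pvPad_length (t : List Char) (n : Nat) (h : t.length ≤ n) : (pvPad t n).length = n := by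
  simp [pvPad]; omega

lemma pvCellsB_ne_nil (cols : List (Option Char × Option Char × Option Char)) (c : Int)
    (h : cols ≠ []) :
    (pvCellsB cols c).1 ≠ [] ∧ (pvCellsB cols c).2.1 ≠ [] ∧ (pvCellsB cols c).2.2 ≠ [] := by
  cases cols with
  | nil => exact absurd rfl h
  | cons col rest =>
    obtain ⟨da, db, ds⟩ := col
    rw [pvCellsB_cons]
    simp

set_option maxRecDepth 8192 in
lemma pvBodyA_unfold (x y o : Int) :
    pvBodyA x y o = String.ofList (
      "\\documentclass{article}\n".toList ++ "\\usepackage{array,mathtools}\n".toList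
      ++ "\\begin{document}\n".toList ++ "\\begin{equation*}\n".toList
      ++ "\\setlength\\arraycolsep{1pt}\n".toList
      ++ "\\begin{array}{*{".toList
      ++ PySem.Int.toChars (max (max (PySem.List.len (PySem.Int.toChars x)) (PySem.List.len (PySem.Int.toChars y))) (PySem.List.len (PySem.Int.toChars o)))
      ++ "}{c}}\n".toList
      ++ PySem.List.slice (pvLoops123 (PySem.Int.toChars x).reverse (PySem.Int.toChars y).reverse (PySem.Int.toChars o).reverse 0 " \\\\\n".toList " \\\\\n".toList " \\\\\n".toList).1 (some 3) none
      ++ PySem.List.slice (pvLoops123 (PySem.Int.toChars x).reverse (PySem.Int.toChars y).reverse (PySem.Int.toChars o).reverse 0 " \\\\\n".toList " \\\\\n".toList " \\\\\n".toList).2.1 (some 3) none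
      ++ "\\hline\n".toList
      ++ PySem.List.slice (pvLoops123 (PySem.Int.toChars x).reverse (PySem.Int.toChars y).reverse (PySem.Int.toChars o).reverse 0 " \\\\\n".toList " \\\\\n".toList " \\\\\n".toList).2.2 (some 3) none
      ++ "\\end{array}\n".toList ++ "\\end{equation*}\n".toList ++ "\\end{document}".toList) := rfl

set_option maxRecDepth 8192 in
lemma pvBodyB_unfold (x y o : Int) :
    pvBodyB x y o = String.ofList (
      "\\documentclass{article}\n\\usepackage{array,mathtools}\n\\begin{document}\n\\begin{equation*}\n\\setlength\\arraycolsep{1pt}\n\\begin{array}{*{".toList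
      ++ PySem.Int.toChars ((max (max (PySem.Int.toChars x).length (PySem.Int.toChars y).length) (PySem.Int.toChars o).length : Nat) : Int)
      ++ "}{c}}\n".toList
      ++ PySem.Chars.join " & ".toList (pvCellsB (List.zip (pvPad (PySem.Int.toChars x) (max (max (PySem.Int.toChars x).length (PySem.Int.toChars y).length) (PySem.Int.toChars o).length)) (List.zip (pvPad (PySem.Int.toChars y) (max (max (PySem.Int.toChars x).length (PySem.Int.toChars y).length) (PySem.Int.toChars o).length)) (pvPad (PySem.Int.toChars o) (max (max (PySem.Int.toChars x).length (PySem.Int.toChars y).length) (PySem.Int.toChars o).length)))).reverse 0).1 ++ " \\\\\n".toList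
      ++ PySem.Chars.join " & ".toList (pvCellsB (List.zip (pvPad (PySem.Int.toChars x) (max (max (PySem.Int.toChars x).length (PySem.Int.toChars y).length) (PySem.Int.toChars o).length)) (List.zip (pvPad (PySem.Int.toChars y) (max (max (PySem.Int.toChars x).length (PySem.Int.toChars y).length) (PySem.Int.toChars o).length)) (pvPad (PySem.Int.toChars o) (max (max (PySem.Int.toChars x).length (PySem.Int.toChars y).length) (PySem.Int.toChars o).length)))).reverse 0).2.1 ++ " \\\\\n".toList
      ++ "\\hline\n".toList
      ++ PySem.Chars.join " & ".toList (pvCellsB (List.zip (pvPad (PySem.Int.toChars x) (max (max (PySem.Int.toChars x).length (PySem.Int.toChars y).length) (PySem.Int.toChars o).length)) (List.zip (pvPad (PySem.Int.toChars y) (max (max (PySem.Int.toChars x).length (PySem.Int.toChars y).length) (PySem.Int.toChars o).length)) (pvPad (PySem.Int.toChars o) (max (max (PySem.Int.toChars x).length (PySem.Int.toChars y).length) (PySem.Int.toChars o).length)))).reverse 0).2.2 ++ " \\\\\n".toList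
      ++ "\\end{array}\n\\end{equation*}\n\\end{document}".toList) := rfl

set_option maxRecDepth 8192 in
lemma pvLitHeader :
    "\\documentclass{article}\n\\usepackage{array,mathtools}\n\\begin{document}\n\\begin{equation*}\n\\setlength\\arraycolsep{1pt}\n\\begin{array}{*{".toList
      = "\\documentclass{article}\n".toList ++ ("\\usepackage{array,mathtools}\n".toList
        ++ ("\\begin{document}\n".toList ++ ("\\begin{equation*}\n".toList
        ++ ("\\setlength\\arraycolsep{1pt}\n".toList ++ "\\begin{array}{*{".toList)))) := by rfl

lemma pvLitFooter :
    "\\end{array}\n\\end{equation*}\n\\end{document}".toList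
      = "\\end{array}\n".toList ++ ("\\end{equation*}\n".toList ++ "\\end{document}".toList) := by rfl

set_option maxRecDepth 8192 in
lemma pvBody_eq (x y : Int) (hy : 0 ≤ y) (hxy : y ≤ x) :
    pvBodyA x y (x + y) = pvBodyB x y (x + y) := by
  have hx : 0 ≤ x := le_trans hy hxy
  have hs : 0 ≤ x + y := by omega
  have hba : (PySem.Int.toChars y).length ≤ (PySem.Int.toChars x).length := pvToChars_len_mono hy hxy
  have has : (PySem.Int.toChars x).length ≤ (PySem.Int.toChars (x + y)).length :=
    pvToChars_len_mono hx (by omega)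
  have hsne : PySem.Int.toChars (x + y) ≠ [] := pvToChars_ne_nil _ hs
  rw [pvBodyA_unfold, pvBodyB_unfold]
  set a := PySem.Int.toChars x with ha
  set b := PySem.Int.toChars y with hb
  set s := PySem.Int.toChars (x + y) with hsdef
  have hn : max (max a.length b.length) s.length = s.length := by omega
  have hslen : 0 < s.length := List.length_pos_iff.mpr hsne
  rw [hn]
  -- the reversed padded columns are exactly the columns pvChain1 produces
  have hcols : (List.zip (pvPad a s.length) (List.zip (pvPad b s.length) (pvPad s s.length))).reverse
      = List.zip (a.reverse.map some ++ List.replicate (s.reverse.length - a.reverse.length) none)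
          (List.zip (b.reverse.map some ++ List.replicate (s.reverse.length - b.reverse.length) none)
            (s.reverse.map some)) := by
    rw [pvZip_reverse _ _ (by
      rw [pvPad_length a _ has, List.length_zip,
        pvPad_length b _ (le_trans hba has), pvPad_length s _ (le_refl _)]
      simp)]
    rw [pvZip_reverse _ _ (by
      rw [pvPad_length b _ (le_trans hba has), pvPad_length s _ (le_refl _)])]
    have hrev : ∀ (t : List Char) (n : Nat), (pvPad t n).reverse
        = t.reverse.map some ++ List.replicate (n - t.length) none := by
      intro t n
      simp [pvPad, List.reverse_append, List.map_reverse]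
    rw [hrev a, hrev b, hrev s]
    simp
  have H := pvChain1 b.reverse a.reverse s.reverse 0
    " \\\\\n".toList " \\\\\n".toList " \\\\\n".toList
    (by simpa using hba) (by simpa using has)
  rw [← hcols] at H
  rw [H]
  -- nonempty cell rows
  have hcolsne : (List.zip (pvPad a s.length) (List.zip (pvPad b s.length) (pvPad s s.length))).reverse ≠ [] := by
    have h0 : ((pvPad a s.length).zip ((pvPad b s.length).zip (pvPad s s.length))).length = s.length := by
      rw [List.length_zip, List.length_zip, pvPad_length a _ has,
        pvPad_length b _ (le_trans hba has), pvPad_length s _ (le_refl _),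
        Nat.min_self, Nat.min_self]
    intro hnil
    rw [← List.length_eq_zero_iff, List.length_reverse, h0] at hnil
    omega
  obtain ⟨hne1, hne2, hne3⟩ := pvCellsB_ne_nil _ 0 hcolsne
  -- each A row: foldr = pvRowStr, then drop the leading " & "
  have hrow : ∀ (cells : List (List Char)), cells ≠ [] →
      PySem.List.slice (cells.foldr (fun cl r => " & ".toList ++ cl ++ r) (" \\\\\n".toList : List Char)) (some 3) none
        = PySem.Chars.join " & ".toList cells ++ " \\\\\n".toList := by
    intro cells hne
    rw [show (cells.foldr (fun cl r => " & ".toList ++ cl ++ r) (" \\\\\n".toList : List Char))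
        = pvRowStr cells " \\\\\n".toList from rfl]
    rw [pvRowStr_eq_join cells hne]
    rw [PySem.List.slice_from _ (show (0:Int) ≤ 3 by norm_num)]
    rfl
  rw [hrow _ hne1, hrow _ hne2, hrow _ hne3]
  -- header: Python's max(len,...) as Int equals the Nat maximum, and the literals concatenate
  have hmax : (max (max (PySem.List.len a) (PySem.List.len b)) (PySem.List.len s)) = ((s.length : Nat) : Int) := by
    simp only [PySem.List.len_eq, ← Nat.cast_max, hn]
  rw [hmax, pvLitHeader, pvLitFooter]
  simp [List.append_assoc]

-- ===== VERDICT (by name: the statement is the Claim_ definition above) =====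
theorem gen_long_additon_spec : Claim_equal_gen_long_additon := by
  intro input1 input2 _hdom hpre
  unfold Spec_gen_long_additon gen_long_additon gen_long_additon_alt
  obtain ⟨h1, h2⟩ := hpre
  by_cases h : input2 > input1
  · simp only [h, if_pos]
    rw [show input1 + input2 = input2 + input1 from add_comm _ _]
    exact pvBody_eq input2 input1 h1 (le_of_lt h)
  · simp only [h, if_false]
    exact pvBody_eq input1 input2 h2 (le_of_not_gt h)
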